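-- pv_equiv track=rewrite | github.com/ofsouzap/advent-of-code-2025 | day2.py | num_valid_part2
-- ===== SOURCE A (Python) =====
-- import math
--
-- def factors(n):
--     acc = set()
--     for i in range(1, int(math.sqrt(n)) + 1):
--         if n % i == 0:
--             acc.add(i)
--             acc.add(n // i)
--     return acc
--
-- def num_valid_part2(n):
--     n_str = str(n)
--     l = len(n_str)
--     for factor_1 in factors(l):
--         if factor_1 == l:
--             continue
--         else:
--             factor_2 = l // factor_1
--             sub = n_str[:factor_1]
--             if n_str == sub * factor_2:
--                 return False
--     return True
-- ===== SOURCE B (Python) =====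
-- def num_valid_part2(n):
--     # n is "valid" iff its decimal string is NOT a nontrivial repetition of a block;
--     # the classic rotation idiom: s is a nontrivial repetition iff s occurs in (s+s)[1:-1].
--     s = str(n)
--     return s not in (s + s)[1:-1]
-- ===== Notes on version B (the rewrite author's own statement) =====
-- stated objective: idiomatic
-- what changed: Replaces the divisor enumeration (sqrt-bounded factor set, candidate block per divisor) with the single string-rotation idiom: s is a nontrivial repetition iff s occurs in (s+s)[1:-1].
import Mathlib
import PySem

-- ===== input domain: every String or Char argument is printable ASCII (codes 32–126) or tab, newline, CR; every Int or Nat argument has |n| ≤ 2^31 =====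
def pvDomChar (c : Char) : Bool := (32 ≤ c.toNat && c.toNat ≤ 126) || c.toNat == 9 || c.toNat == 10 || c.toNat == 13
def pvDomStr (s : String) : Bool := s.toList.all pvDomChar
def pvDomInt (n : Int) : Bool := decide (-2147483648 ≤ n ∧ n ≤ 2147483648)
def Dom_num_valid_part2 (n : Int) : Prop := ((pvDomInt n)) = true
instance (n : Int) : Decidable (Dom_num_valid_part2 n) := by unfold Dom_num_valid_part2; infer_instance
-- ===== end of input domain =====

-- B replaces A's divisor enumeration with the string-rotation idiom `s in (s+s)[1:-1]` (idiomatic; return value only).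

-- ===== PORT A =====
-- factors(n): sqrt-bounded divisor enumeration into a Python set.
-- int(math.sqrt(n)) is ported as Nat.sqrt: exact for the values it is applied to here
-- (n = len(str(...)), far below where float sqrt could misround).
def factorsA (n : Int) : PySem.Set Int :=
  (PySem.List.pyRange 1 ((Nat.sqrt n.toNat : Int) + 1) 1).foldl
    (fun acc i =>
      if PySem.Int.mod n i == 0 then
        PySem.Set.add (PySem.Set.add acc i) (PySem.Int.floordiv n i)
      else acc)
    PySem.Set.empty

-- the 'for factor_1 in factors(l)' loop with its early 'return False'
def loopA (s : List Char) (l : Int) : List Int → Bool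
  | [] => true
  | f :: rest =>
    if f == l then loopA s l rest
    else
      let f2 := PySem.Int.floordiv l f
      let sub := PySem.Chars.slice s none (some f)
      if s == PySem.List.pyRepeat sub f2 then false
      else loopA s l rest

def num_valid_part2 (n : Int) : Bool :=
  let s := PySem.Int.toChars n
  let l : Int := (PySem.Chars.len s : Int)
  loopA s l (factorsA l)

-- ===== PORT B =====
def num_valid_part2_alt (n : Int) : Bool :=
  let s := PySem.Int.toChars n
  !(PySem.Chars.isIn s (PySem.Chars.slice (s ++ s) (some 1) (some (-1))))

-- ===== PRECONDITION & SPEC =====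
def Spec_num_valid_part2 (n : Int) (out : Bool) : Prop := out = num_valid_part2_alt n
instance (n : Int) (out : Bool) : Decidable (Spec_num_valid_part2 n out) := by unfold Spec_num_valid_part2; infer_instance

-- ===== CLAIM (what is proved, stated in full; the proofs are below) =====
def Claim_equal_num_valid_part2 : Prop := ∀ (n : Int), Dom_num_valid_part2 n → Spec_num_valid_part2 n (num_valid_part2 n)

-- ===== LEMMAS AND PROOFS =====

-- str(n) is never empty
lemma toDigitsCore_ne_nil (b : Nat) : ∀ (f n : Nat) (l : List Char), 1 ≤ f ∨ l ≠ [] →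
    Nat.toDigitsCore b f n l ≠ [] := by
  intro f
  induction f with
  | zero => intro n l h; rcases h with h | h; · omega
            · simpa [Nat.toDigitsCore] using h
  | succ f ih =>
    intro n l _
    simp only [Nat.toDigitsCore]
    split
    · simp
    · exact ih (n / b) (Nat.digitChar (n % b) :: l) (Or.inr (by simp))

lemma toChars_ne_nil (n : Int) : PySem.Int.toChars n ≠ [] := by
  unfold PySem.Int.toChars
  split
  · simp
  · exact toDigitsCore_ne_nil 10 _ _ [] (Or.inl (by omega))

-- the repetition condition, in Nat form
def RepBlock (s : List Char) (d : Nat) : Prop :=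
  s = (List.replicate (s.length / d) (s.take d)).flatten

-- A's loop returns false iff some listed factor f ≠ l witnesses the repetition
lemma loopA_eq_false_iff (s : List Char) (l : Int) (fs : List Int) :
    loopA s l fs = false ↔
      ∃ f ∈ fs, f ≠ l ∧ s = PySem.List.pyRepeat (PySem.Chars.slice s none (some f)) (PySem.Int.floordiv l f) := by
  induction fs with
  | nil => simp [loopA]
  | cons f rest ih =>
    by_cases hfl : f = l
    · subst hfl
      simp only [loopA, beq_self_eq_true, if_true, ih]
      constructor
      · rintro ⟨g, hg, h⟩; exact ⟨g, List.mem_cons_of_mem _ hg, h⟩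
      · rintro ⟨g, hg, hne, hrep⟩
        rcases List.mem_cons.mp hg with rfl | hg
        · exact absurd rfl hne
        · exact ⟨g, hg, hne, hrep⟩
    · by_cases hrep : s = PySem.List.pyRepeat (PySem.Chars.slice s none (some f)) (PySem.Int.floordiv l f)
      · simp only [loopA]
        rw [if_neg (by simpa using hfl), if_pos (by simpa using hrep)]
        exact iff_of_true rfl ⟨f, List.mem_cons_self, hfl, hrep⟩
      · simp only [loopA]
        rw [if_neg (by simpa using hfl), if_neg (by simpa using hrep), ih]
        constructor
        · rintro ⟨g, hg, h⟩; exact ⟨g, List.mem_cons_of_mem _ hg, h⟩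
        · rintro ⟨g, hg, hne, hr⟩
          rcases List.mem_cons.mp hg with rfl | hg
          · exact absurd hr hrep
          · exact ⟨g, hg, hne, hr⟩

-- generic membership through the factors fold
lemma mem_factors_fold (n : Int) (xs : List Int) (acc : PySem.Set Int) (f : Int) :
    f ∈ xs.foldl (fun acc i =>
        if PySem.Int.mod n i == 0 then
          PySem.Set.add (PySem.Set.add acc i) (PySem.Int.floordiv n i)
        else acc) acc ↔
      f ∈ acc ∨ ∃ i ∈ xs, PySem.Int.mod n i = 0 ∧ (f = i ∨ f = PySem.Int.floordiv n i) := by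
  induction xs generalizing acc with
  | nil => simp
  | cons i rest ih =>
    simp only [List.foldl_cons, ih]
    by_cases h : PySem.Int.mod n i = 0
    · rw [if_pos (by simpa using h)]
      simp only [PySem.Set.mem_add]
      constructor
      · rintro ((((hf | rfl) | rfl) | ⟨j, hj, hjm, hjf⟩))
        · exact Or.inl hf
        · exact Or.inr ⟨f, List.mem_cons_self, h, Or.inl rfl⟩
        · exact Or.inr ⟨i, List.mem_cons_self, h, Or.inr rfl⟩
        · exact Or.inr ⟨j, List.mem_cons_of_mem _ hj, hjm, hjf⟩
      · rintro (hf | ⟨j, hj, hjm, hjf⟩)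
        · exact Or.inl (Or.inl (Or.inl hf))
        · rcases List.mem_cons.mp hj with rfl | hj
          · rcases hjf with rfl | rfl
            · exact Or.inl (Or.inl (Or.inr rfl))
            · exact Or.inl (Or.inr rfl)
          · exact Or.inr ⟨j, hj, hjm, hjf⟩
    · rw [if_neg (by simpa using h)]
      constructor
      · rintro (hf | ⟨j, hj, hjm, hjf⟩)
        · exact Or.inl hf
        · exact Or.inr ⟨j, List.mem_cons_of_mem _ hj, hjm, hjf⟩
      · rintro (hf | ⟨j, hj, hjm, hjf⟩)
        · exact Or.inl hf
        · rcases List.mem_cons.mp hj with rfl | hj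
          · exact absurd hjm h
          · exact Or.inr ⟨j, hj, hjm, hjf⟩

-- membership in A's factor set = divisors of L between 1 and L
lemma mem_factorsA (L : Nat) (hL : 0 < L) (f : Int) :
    f ∈ factorsA (L : Int) ↔ ∃ d : Nat, f = (d : Int) ∧ d ∣ L ∧ 1 ≤ d ∧ d ≤ L := by
  unfold factorsA
  rw [mem_factors_fold]
  have hEmpty : f ∈ (PySem.Set.empty : PySem.Set Int) ↔ False := by
    simp [PySem.Set.empty]
  rw [hEmpty]
  simp only [false_or]
  constructor
  · rintro ⟨i, hi, him, hif⟩
    rw [PySem.List.mem_pyRange_one] at hi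
    obtain ⟨hi1, _⟩ := hi
    obtain ⟨di, rfl⟩ : ∃ di : Nat, i = (di : Int) := ⟨i.toNat, (Int.toNat_of_nonneg (by omega)).symm⟩
    have hdipos : 1 ≤ di := by exact_mod_cast hi1
    have hdvd : di ∣ L := by
      have := (PySem.Int.mod_eq_zero_iff_dvd (L : Int) (di : Int)).mp (by simpa using him)
      exact_mod_cast this
    rcases hif with rfl | rfl
    · exact ⟨di, rfl, hdvd, hdipos, Nat.le_of_dvd hL hdvd⟩
    · refine ⟨L / di, ?_, Nat.div_dvd_of_dvd hdvd, ?_, Nat.div_le_self _ _⟩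
      · rw [PySem.Int.floordiv_natCast]
      · exact Nat.div_pos (Nat.le_of_dvd hL hdvd) hdipos
  · rintro ⟨d, rfl, hdvd, hd1, hdL⟩
    have hsq : Int.toNat (L : Int) = L := by simp
    by_cases hds : d ≤ Nat.sqrt L
    · refine ⟨(d : Int), ?_, ?_, Or.inl rfl⟩
      · rw [PySem.List.mem_pyRange_one, hsq]
        constructor
        · exact_mod_cast hd1
        · have : (d : Int) ≤ (Nat.sqrt L : Int) := by exact_mod_cast hds
          omega
      · rw [PySem.Int.mod_eq_zero_iff_dvd]
        exact_mod_cast hdvd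
    · -- d > sqrt L: use the cofactor e = L / d, then L // e = d
      set e := L / d with he
      have hde : d * e = L := Nat.mul_div_cancel' hdvd
      have hLd : L < d * d := by
        have := Nat.sqrt_lt.mp (by omega : Nat.sqrt L < d)
        exact this
      have hed : e < d := by
        by_contra hc
        push_neg at hc
        have : d * d ≤ d * e := Nat.mul_le_mul_left d hc
        omega
      have hepos : 0 < e := Nat.div_pos (Nat.le_of_dvd hL hdvd) (by omega)
      have hes : e ≤ Nat.sqrt L := by
        apply Nat.le_sqrt.mpr
        calc e * e ≤ e * d := Nat.mul_le_mul_left e (le_of_lt hed)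
          _ = L := by rw [Nat.mul_comm]; exact hde
      have hedvd : e ∣ L := Nat.div_dvd_of_dvd hdvd
      refine ⟨(e : Int), ?_, ?_, Or.inr ?_⟩
      · rw [PySem.List.mem_pyRange_one, hsq]
        constructor
        · exact_mod_cast hepos
        · have : (e : Int) ≤ (Nat.sqrt L : Int) := by exact_mod_cast hes
          omega
      · rw [PySem.Int.mod_eq_zero_iff_dvd]
        exact_mod_cast hedvd
      · rw [PySem.Int.floordiv_natCast]
        congr 1
        rw [← hde, Nat.mul_div_cancel _ hepos]

-- B's slice is tail.dropLast
lemma slice_one_neg_one (xs : List Char) (h : 2 ≤ xs.length) :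
    PySem.List.slice xs (some 1) (some (-1)) = xs.tail.dropLast := by
  have h1 : PySem.List.clampIdx xs.length 1 = 1 := by
    simp [PySem.List.clampIdx]
    try omega
  simp only [PySem.List.slice, PySem.List.clampIdx_neg_one, h1]
  rw [List.dropLast_eq_take, List.length_tail, ← List.drop_one]

-- cyclic-shift invariance
def Cyc (s : List Char) (k : Nat) : Prop :=
  ∀ i < s.length, s.getD i 'A' = s.getD ((i + k) % s.length) 'A'

lemma length_flat_rep (k : Nat) (b : List Char) :
    ((List.replicate k b).flatten).length = k * b.length := by
  induction k with
  | zero => simp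
  | succ k ih => simp [List.replicate_succ, ih, Nat.succ_mul, Nat.add_comm]

lemma flat_rep_getD (b : List Char) :
    ∀ (k i : Nat), i < k * b.length →
      ((List.replicate k b).flatten).getD i 'A' = b.getD (i % b.length) 'A' := by
  intro k
  induction k with
  | zero => intro i h; omega
  | succ k ih =>
    intro i h
    rw [Nat.succ_mul] at h
    rw [List.replicate_succ, List.flatten_cons]
    by_cases hi : i < b.length
    · rw [List.getD_append _ _ _ _ hi, Nat.mod_eq_of_lt hi]
    · push_neg at hi
      rw [List.getD_append_right _ _ _ _ hi, ih (i - b.length) (by omega)]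
      congr 1
      have hieq : i - b.length + b.length = i := by omega
      conv_rhs => rw [← hieq, Nat.add_mod_right]

lemma cyc_add (s : List Char) (a b : Nat) (ha : Cyc s a) (hb : Cyc s b) : Cyc s (a + b) := by
  intro i hi
  have hL : 0 < s.length := by omega
  rw [ha i hi, hb ((i + a) % s.length) (Nat.mod_lt _ hL)]
  congr 1
  rw [Nat.mod_add_mod, Nat.add_assoc]

lemma cyc_mul (s : List Char) (r : Nat) (hr : Cyc s r) : ∀ m, Cyc s (m * r) := by
  intro m
  induction m with
  | zero => intro i hi; rw [Nat.zero_mul, Nat.add_zero, Nat.mod_eq_of_lt hi]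
  | succ m ih =>
    have := cyc_add s (m * r) r ih hr
    rw [Nat.succ_mul]
    exact this

lemma cyc_mod (s : List Char) (k : Nat) (hk : Cyc s k) : Cyc s (k % s.length) := by
  intro i hi
  rw [hk i hi]
  congr 1
  exact (Nat.add_mod_mod i k s.length).symm

lemma exists_mul_mod_gcd (r L : Nat) (hr : 0 < r) (hrL : r < L) :
    ∃ m : Nat, (m * r) % L = Nat.gcd r L := by
  have hL : 0 < L := by omega
  have hgr : Nat.gcd r L ≤ r := Nat.gcd_le_left _ hr
  have hbez := Nat.gcd_eq_gcd_ab r L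
  refine ⟨(Nat.gcdA r L % (L : Int)).toNat, ?_⟩
  set A := Nat.gcdA r L with hA
  set B := Nat.gcdB r L with hB
  have hmodpos : (0 : Int) ≤ A % L := Int.emod_nonneg A (by exact_mod_cast hL.ne')
  have hcast : (((A % (L : Int)).toNat : Int)) = A % L := Int.toNat_of_nonneg hmodpos
  have e1 : Int.ModEq L (A % L) A := Int.emod_emod_of_dvd A dvd_rfl
  have e2 : Int.ModEq L ((A % L) * r) (A * r) := e1.mul_right _
  have e3 : Int.ModEq L (A * r) (Nat.gcd r L) := by
    rw [Int.modEq_iff_dvd]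
    refine ⟨B, ?_⟩
    rw [hbez]; ring
  have e4 := e2.trans e3
  have h1 : (((A % (L : Int)).toNat : Int) * r) % L = ((Nat.gcd r L : Int)) % L := by
    rw [hcast]; exact e4
  have h2 : ((Nat.gcd r L : Int)) % L = (Nat.gcd r L : Int) := by
    apply Int.emod_eq_of_lt
    · exact_mod_cast Nat.zero_le _
    · exact_mod_cast lt_of_le_of_lt hgr hrL
  rw [h2] at h1
  have h3 : ((((Nat.gcdA r L % (L : Int)).toNat * r : Nat)) : Int) % (L : Int)
      = (Nat.gcd r L : Int) := by
    push_cast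
    exact h1
  exact_mod_cast h3

lemma rot_cyc (s : List Char) (r : Nat) (hr : r ≤ s.length)
    (h : s = s.drop r ++ s.take r) : Cyc s r := by
  intro i hi
  conv_lhs => rw [h]
  by_cases hx : i < s.length - r
  · rw [List.getD_append _ _ _ _ (by rw [List.length_drop]; omega)]
    rw [List.getD_eq_getElem _ _ (by rw [List.length_drop]; omega),
        List.getElem_drop, ← List.getD_eq_getElem _ 'A' (by omega : r + i < s.length)]
    congr 1
    rw [Nat.mod_eq_of_lt (by omega : i + r < s.length)]
    omega
  · push_neg at hx
    rw [List.getD_append_right _ _ _ _ (by rw [List.length_drop]; omega)]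
    rw [List.length_drop]
    rw [List.getD_eq_getElem _ _ (by rw [List.length_take]; omega),
        List.getElem_take, ← List.getD_eq_getElem _ 'A' (by omega : i - (s.length - r) < s.length)]
    congr 1
    have hge : s.length ≤ i + r := by omega
    rw [Nat.mod_eq_sub_mod hge, Nat.mod_eq_of_lt (by omega)]
    omega

-- the repetition condition from cyclic invariance by a divisor
lemma cyc_rep (s : List Char) (g : Nat) (hg : 0 < g) (hgL : g ≤ s.length)
    (hdvd : g ∣ s.length) (hc : Cyc s g) : RepBlock s g := by
  have key : ∀ i, i < s.length → s.getD i 'A' = s.getD (i % g) 'A' := by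
    intro i
    induction i using Nat.strong_induction_on with
    | _ i ih =>
      intro hiL
      by_cases hig : i < g
      · rw [Nat.mod_eq_of_lt hig]
      · push_neg at hig
        have h1 : i - g < s.length := by omega
        have h2 := hc (i - g) h1
        have h3 : (i - g + g) % s.length = i := by
          have hieq : i - g + g = i := by omega
          rw [hieq, Nat.mod_eq_of_lt hiL]
        rw [h3] at h2
        rw [← h2, ih (i - g) (by omega) h1]
        congr 1
        have hieq : i - g + g = i := by omega
        conv_rhs => rw [← hieq, Nat.add_mod_right]
  have hbl : (s.take g).length = g := by rw [List.length_take]; omega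
  unfold RepBlock
  apply List.ext_getElem
  · rw [length_flat_rep, hbl, Nat.div_mul_cancel hdvd]
  · intro i h1 h2
    have himod : i % g < g := Nat.mod_lt _ hg
    have hflat : ((List.replicate (s.length / g) (s.take g)).flatten).getD i 'A'
        = (s.take g).getD (i % g) 'A' := by
      rw [flat_rep_getD _ _ _ (by rw [hbl, Nat.div_mul_cancel hdvd]; exact h1), hbl]
    have htake : (s.take g).getD (i % g) 'A' = s.getD (i % g) 'A' := by
      rw [List.getD_eq_getElem _ _ (by omega : i % g < (s.take g).length),
          List.getElem_take, ← List.getD_eq_getElem _ 'A' (by omega : i % g < s.length)]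
    rw [← List.getD_eq_getElem s 'A' h1, ← List.getD_eq_getElem _ 'A' h2,
        hflat, htake]
    exact key i h1

-- forward half: an occurrence of s inside (s+s)[1:-1] is a nontrivial rotation
lemma infix_rot (s : List Char) (hs : s ≠ []) (h : s <:+: (s ++ s).tail.dropLast) :
    ∃ r, 1 ≤ r ∧ r < s.length ∧ s = s.drop r ++ s.take r := by
  have hL : 0 < s.length := List.length_pos_iff.mpr hs
  obtain ⟨p, q, hpq⟩ := h
  have htlen : ((s ++ s).tail.dropLast).length = s.length + s.length - 2 := by
    rw [List.length_dropLast, List.length_tail, List.length_append]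
    omega
  have hplen : p.length + s.length + q.length = s.length + s.length - 2 := by
    have := congrArg List.length hpq
    rw [htlen] at this
    simp only [List.length_append] at this
    omega
  have hrL : p.length + 1 < s.length := by omega
  -- s is a prefix of (s ++ s).drop (p.length + 1)
  have hpre : s <+: (s ++ s).drop (p.length + 1) := by
    have ht : (s ++ s).tail.dropLast
        = ((s ++ s).drop 1).take (s.length + s.length - 2) := by
      rw [← List.drop_one, List.dropLast_eq_take, List.length_drop, List.length_append]
      congr 1
    have hdt : ((s ++ s).tail.dropLast).drop p.length
        = ((s ++ s).drop (p.length + 1)).take (s.length + s.length - 2 - p.length) := by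
      rw [ht, List.drop_take, List.drop_drop, Nat.add_comm 1 p.length]
    have hsq : ((s ++ s).tail.dropLast).drop p.length = s ++ q := by
      rw [← hpq, List.append_assoc, List.drop_append_of_le_length (le_refl _)]
      simp
    have hstep : s <+: ((s ++ s).drop (p.length + 1)).take (s.length + s.length - 2 - p.length) := by
      rw [← hdt, hsq]
      exact List.prefix_append s q
    exact hstep.trans (List.take_prefix _ _)
  have hdropeq : (s ++ s).drop (p.length + 1) = s.drop (p.length + 1) ++ s := by
    rw [List.drop_append]
    congr 1
    rw [show p.length + 1 - s.length = 0 by omega, List.drop_zero]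
  rw [hdropeq] at hpre
  have hpre2 : s.drop (p.length + 1) ++ s.take (p.length + 1)
      <+: s.drop (p.length + 1) ++ s :=
    (List.prefix_append_right_inj _).mpr (List.take_prefix _ s)
  have hlen2 : (s.drop (p.length + 1) ++ s.take (p.length + 1)).length = s.length := by
    rw [List.length_append, List.length_drop, List.length_take]
    omega
  have hfin : s.drop (p.length + 1) ++ s.take (p.length + 1) <+: s :=
    List.prefix_of_prefix_length_le hpre2 hpre (by rw [hlen2])
  exact ⟨p.length + 1, by omega, hrL, (hfin.eq_of_length (by rw [hlen2])).symm⟩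

-- backward half: a proper-divisor repetition occurs inside (s+s)[1:-1]
lemma rep_infix (s : List Char) (d : Nat) (hd1 : 1 ≤ d) (hdL : d < s.length)
    (hdvd : d ∣ s.length) (hrep : RepBlock s d) :
    s <:+: (s ++ s).tail.dropLast := by
  have hkd : (s.length / d) * d = s.length := Nat.div_mul_cancel hdvd
  have hk2 : 2 ≤ s.length / d := by
    by_contra hcon
    push_neg at hcon
    interval_cases h : (s.length / d) <;> omega
  have hbl : (s.take d).length = d := by rw [List.length_take]; omega
  have h1 : s = s.take d ++ (List.replicate (s.length / d - 1) (s.take d)).flatten := by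
    conv_lhs => rw [hrep]
    rw [show s.length / d = (s.length / d - 1) + 1 by omega, List.replicate_succ,
        List.flatten_cons]
    simp
  have h2 : s = (List.replicate (s.length / d - 1) (s.take d)).flatten ++ s.take d := by
    conv_lhs => rw [hrep]
    rw [show s.length / d = (s.length / d - 1) + 1 by omega, List.replicate_succ',
        List.flatten_append, List.flatten_cons, List.flatten_nil, List.append_nil]
    simp
  set b := s.take d with hbdef
  set M := (List.replicate (s.length / d - 1) b).flatten with hMdef
  have hbne : b ≠ [] := by
    intro hcon
    rw [hcon] at hbl
    simp at hbl
    omega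
  have hMne : M ≠ [] := by
    intro hcon
    have hlen := congrArg List.length hcon
    rw [hMdef, length_flat_rep, hbl] at hlen
    simp at hlen
    rcases hlen with hcase | hcase <;> omega
  have hcomm : M ++ b = b ++ M := by
    rw [← h2, ← h1]
  have hss : s ++ s = b ++ (s ++ M) := by
    calc s ++ s = (b ++ M) ++ s := by rw [← h1]
      _ = b ++ (M ++ s) := by rw [List.append_assoc]
      _ = b ++ (M ++ (b ++ M)) := by rw [← h1]
      _ = b ++ ((M ++ b) ++ M) := by rw [List.append_assoc]
      _ = b ++ ((b ++ M) ++ M) := by rw [hcomm]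
      _ = b ++ (s ++ M) := by rw [← h1]
  obtain ⟨c, bt, hbc⟩ := List.exists_cons_of_ne_nil hbne
  have htail : (s ++ s).tail = bt ++ (s ++ M) := by
    rw [hss, hbc, List.cons_append, List.tail_cons]
  have hdrop : (s ++ s).tail.dropLast = bt ++ (s ++ M.dropLast) := by
    rw [htail, List.dropLast_append_of_ne_nil (by simp [hMne] : s ++ M ≠ []),
        List.dropLast_append_of_ne_nil hMne]
  exact ⟨bt, M.dropLast, by rw [hdrop, List.append_assoc]⟩

-- the mathematical core: nontrivial rotation-occurrence ↔ proper-divisor repetition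
lemma infix_iff_rep (s : List Char) (hs : s ≠ []) :
    s <:+: (s ++ s).tail.dropLast ↔
      ∃ d : Nat, d ∣ s.length ∧ 1 ≤ d ∧ d < s.length ∧ RepBlock s d := by
  constructor
  · intro h
    obtain ⟨r, hr1, hrL, hrot⟩ := infix_rot s hs h
    have hgpos : 0 < Nat.gcd r s.length := Nat.gcd_pos_of_pos_left _ (by omega)
    have hgr : Nat.gcd r s.length ≤ r := Nat.gcd_le_left _ (by omega)
    have hgdvd : Nat.gcd r s.length ∣ s.length := Nat.gcd_dvd_right _ _
    have hcr : Cyc s r := rot_cyc s r (by omega) hrot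
    obtain ⟨m, hm⟩ := exists_mul_mod_gcd r s.length (by omega) hrL
    have hcg : Cyc s (Nat.gcd r s.length) := by
      have hstep := cyc_mod s (m * r) (cyc_mul s r hcr m)
      rw [hm] at hstep
      exact hstep
    exact ⟨Nat.gcd r s.length, hgdvd, hgpos, by omega,
      cyc_rep s _ hgpos (by omega) hgdvd hcg⟩
  · rintro ⟨d, hdvd, hd1, hdL, hrep⟩
    exact rep_infix s d hd1 hdL hdvd hrep

-- ===== VERDICT (by name: the statement is the Claim_ definition above) =====
theorem num_valid_part2_spec : Claim_equal_num_valid_part2 := by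
  intro n _
  unfold Spec_num_valid_part2
  set s := PySem.Int.toChars n with hsdef
  have hsne : s ≠ [] := by rw [hsdef]; exact toChars_ne_nil n
  have hL : 0 < s.length := List.length_pos_iff.mpr hsne
  have hAeq : num_valid_part2 n = loopA s (PySem.Chars.len s) (factorsA (PySem.Chars.len s)) := rfl
  rw [PySem.Chars.len_eq] at hAeq
  have hBeq : num_valid_part2_alt n
      = !(PySem.Chars.isIn s (PySem.Chars.slice (s ++ s) (some 1) (some (-1)))) := rfl
  have hslice : PySem.Chars.slice (s ++ s) (some 1) (some (-1)) = (s ++ s).tail.dropLast := by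
    rw [PySem.Chars.slice_eq_listSlice]
    exact slice_one_neg_one (s ++ s) (by rw [List.length_append]; omega)
  rw [hslice] at hBeq
  rw [hAeq, hBeq]
  have hiff : (loopA s ((s.length : Int)) (factorsA ((s.length : Int))) = false)
      ↔ (PySem.Chars.isIn s ((s ++ s).tail.dropLast) = true) := by
    rw [loopA_eq_false_iff, PySem.Chars.isIn_iff_infix, infix_iff_rep s hsne]
    constructor
    · rintro ⟨f, hf, hne, hrep⟩
      rw [mem_factorsA s.length hL f] at hf
      obtain ⟨d, rfl, hdvd, hd1, hdL⟩ := hf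
      have hdlt : d < s.length := by
        rcases Nat.lt_or_ge d s.length with hcase | hcase
        · exact hcase
        · exact absurd (by exact_mod_cast (by omega : d = s.length)) hne
      refine ⟨d, hdvd, hd1, hdlt, ?_⟩
      unfold RepBlock
      rw [PySem.Chars.slice_eq_listSlice, PySem.List.slice_to_natCast,
          PySem.Int.floordiv_natCast] at hrep
      unfold PySem.List.pyRepeat at hrep
      rw [Int.toNat_natCast] at hrep
      exact hrep
    · rintro ⟨d, hdvd, hd1, hdL, hrep⟩
      refine ⟨(d : Int), ?_, ?_, ?_⟩
      · rw [mem_factorsA s.length hL]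
        exact ⟨d, rfl, hdvd, hd1, by omega⟩
      · intro hcon
        have : d = s.length := by exact_mod_cast hcon
        omega
      · rw [PySem.Chars.slice_eq_listSlice, PySem.List.slice_to_natCast,
            PySem.Int.floordiv_natCast]
        unfold PySem.List.pyRepeat
        rw [Int.toNat_natCast]
        exact hrep
  cases hA : loopA s ((s.length : Int)) (factorsA ((s.length : Int))) with
  | false =>
    rw [hiff.mp hA]
    rfl
  | true =>
    have hIn : PySem.Chars.isIn s ((s ++ s).tail.dropLast) = false := by
      cases hin : PySem.Chars.isIn s ((s ++ s).tail.dropLast) with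
      | false => rfl
      | true => rw [hiff.mpr hin] at hA; exact absurd hA (by simp)
    rw [hIn]
    rfl
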